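-- pv_equiv track=rewrite | github.com/UW-Computational-Plasma-Group/warpii | docs/scripts/process_params_json.py | group_li_tags
-- ===== SOURCE A (Python) =====
-- def group_li_tags(text):
--     lines = text.split('\n')
--     result = []
--     current_list = []
--
--     for i, line in enumerate(lines):
--         if line.strip().startswith('<li>'):
--             if not current_list and (i == 0 or not lines[i-1].strip().startswith('<li>')):
--                 # Start a new list
--                 result.append('<ul>')
--             current_list.append(line.strip())
--         else:
--             if current_list:
--                 # Close the current list
--                 result.append('\n'.join(current_list))
--                 result.append('</ul>')
--                 current_list = []
--             result.append(line)
--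
--     # Add any remaining list items
--     if current_list:
--         result.append('\n'.join(current_list))
--         result.append('</ul>')
--
--     return '\n'.join(result)
-- ===== SOURCE B (Python) =====
-- def group_li_tags(text):
--     lines = text.split('\n')
--     out = []
--     i = 0
--     n = len(lines)
--     while i < n:
--         if lines[i].strip().startswith('<li>'):
--             j = i
--             while j < n and lines[j].strip().startswith('<li>'):
--                 j += 1
--             out.append('<ul>')
--             out.extend(line.strip() for line in lines[i:j])
--             out.append('</ul>')
--             i = j
--         else:
--             out.append(lines[i])
--             i += 1
--     return '\n'.join(out)
-- ===== Notes on version B (the rewrite author's own statement) =====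
-- stated objective: idiomatic
-- what changed: B partitions the lines into maximal runs up front (an inner scan finds each run of <li> lines, which is emitted wrapped and stripped in one slice) instead of threading a current_list buffer, an enumerate index and a lines[i-1] look-back guard through a single stateful loop.
import Mathlib
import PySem

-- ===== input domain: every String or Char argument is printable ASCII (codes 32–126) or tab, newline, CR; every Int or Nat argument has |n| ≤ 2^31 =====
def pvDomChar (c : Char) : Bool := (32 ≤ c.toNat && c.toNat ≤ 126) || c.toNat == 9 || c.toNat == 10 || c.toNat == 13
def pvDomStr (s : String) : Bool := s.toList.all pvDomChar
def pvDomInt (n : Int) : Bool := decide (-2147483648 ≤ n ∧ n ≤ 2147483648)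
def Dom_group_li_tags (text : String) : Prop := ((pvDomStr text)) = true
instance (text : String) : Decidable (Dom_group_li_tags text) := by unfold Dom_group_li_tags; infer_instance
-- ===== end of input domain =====

-- B groups the lines into maximal runs of <li> lines with an inner scan instead of A's
-- single stateful loop with a current_list buffer and a lines[i-1] look-back guard;
-- objective: more idiomatic run-partitioning, same cost.

-- ===== PORT A =====
-- shared: line.strip().startswith('<li>')
def liLine (l : List Char) : Bool := PySem.Chars.startswith (PySem.Chars.strip l) ['<', 'l', 'i', '>']

-- shared: '\n'.join(parts)
def joinN (xs : List (List Char)) : List Char := PySem.Chars.join ['\n'] xs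

-- A's for-loop over enumerate(lines): state = (result, current_list), index i for lines[i-1]
def loopA (lines : List (List Char)) : List (List Char) → Nat → List (List Char) → List (List Char) → List (List Char)
  | [], _, result, cur =>
      -- trailing 'if current_list: result.append('\n'.join(current_list)); result.append('</ul>')'
      if cur.isEmpty then result else result ++ [joinN cur, ['<', '/', 'u', 'l', '>']]
  | line :: rest, i, result, cur =>
      if liLine line then
        let result' :=
          if cur.isEmpty && (i == 0 || !(liLine (lines.getD (i - 1) []))) then
            result ++ [['<', 'u', 'l', '>']]
          else result
        loopA lines rest (i + 1) result' (cur ++ [PySem.Chars.strip line])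
      else
        let result' := if cur.isEmpty then result else result ++ [joinN cur, ['<', '/', 'u', 'l', '>']]
        loopA lines rest (i + 1) (result' ++ [line]) []

def group_li_tags (text : String) : String :=
  let lines := PySem.Chars.splitOn text.toList ['\n']
  String.ofList (joinN (loopA lines lines 0 [] []))

-- ===== PORT B =====
-- B's outer while loop: at an <li> line the inner scan takes the whole run (takeWhile),
-- emits '<ul>', the stripped run, '</ul>', and continues past it (dropWhile).
def buildB : List (List Char) → List (List Char)
  | [] => []
  | l :: rest =>
      if liLine l then
        ['<', 'u', 'l', '>'] ::
          ((List.takeWhile liLine (l :: rest)).map PySem.Chars.strip ++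
            (['<', '/', 'u', 'l', '>'] :: buildB (List.dropWhile liLine rest)))
      else l :: buildB rest
  termination_by xs => xs.length
  decreasing_by
    · have := List.length_dropWhile_le (p := liLine) (l := rest)
      simp; omega
    · simp

def group_li_tags_alt (text : String) : String :=
  let lines := PySem.Chars.splitOn text.toList ['\n']
  String.ofList (joinN (buildB lines))

-- ===== PRECONDITION & SPEC =====
def Spec_group_li_tags (text : String) (out : String) : Prop := out = group_li_tags_alt text
instance (text : String) (out : String) : Decidable (Spec_group_li_tags text out) := by unfold Spec_group_li_tags; infer_instance

-- ===== CLAIM (what is proved, stated in full; the proofs are below) =====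
def Claim_equal_group_li_tags : Prop := ∀ (text : String), Dom_group_li_tags text → Spec_group_li_tags text (group_li_tags text)

-- ===== LEMMAS AND PROOFS =====

-- A's loop with the index check eliminated via its invariant (cur empty ↔ no preceding <li>)
def refA : List (List Char) → List (List Char) → List (List Char)
  | [], pend => if pend.isEmpty then [] else [joinN pend, ['<', '/', 'u', 'l', '>']]
  | l :: r, pend =>
      if liLine l then
        if pend.isEmpty then ['<', 'u', 'l', '>'] :: refA r [PySem.Chars.strip l]
        else refA r (pend ++ [PySem.Chars.strip l])
      else
        if pend.isEmpty then l :: refA r []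
        else joinN pend :: ['<', '/', 'u', 'l', '>'] :: l :: refA r []

-- B's recursion generalized by a pending (already-stripped) open run
def buildB' (pend : List (List Char)) (rest : List (List Char)) : List (List Char) :=
  if pend.isEmpty then buildB rest
  else pend ++ (List.takeWhile liLine rest).map PySem.Chars.strip ++
        (['<', '/', 'u', 'l', '>'] :: buildB (List.dropWhile liLine rest))

theorem joinN_cons_cons (x y : List Char) (zs : List (List Char)) :
    joinN (x :: y :: zs) = x ++ '\n' :: joinN (y :: zs) := by
  simp [joinN, PySem.Chars.join_cons_cons]

theorem joinN_singleton (x : List Char) : joinN [x] = x := by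
  simp [joinN, PySem.Chars.join_singleton]

theorem joinN_head_append (a b : List Char) (zs : List (List Char)) :
    joinN ((a ++ b) :: zs) = a ++ joinN (b :: zs) := by
  cases zs with
  | nil => simp [joinN_singleton]
  | cons z zs => simp [joinN_cons_cons]

theorem joinN_collapse (P zs : List (List Char)) (hP : P ≠ []) :
    joinN (joinN P :: zs) = joinN (P ++ zs) := by
  induction P with
  | nil => exact absurd rfl hP
  | cons x P ih =>
      cases P with
      | nil => simp [joinN_singleton]
      | cons y P' =>
          rw [joinN_cons_cons]
          have h1 : (x ++ '\n' :: joinN (y :: P')) = x ++ (['\n'] ++ joinN (y :: P')) := by simp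
          rw [h1]
          simp only [joinN_head_append]
          rw [ih (by simp)]
          simp [joinN_cons_cons]

theorem joinN_cons_congr (x : List Char) (ys zs : List (List Char))
    (he : ys = [] ↔ zs = []) (h : joinN ys = joinN zs) :
    joinN (x :: ys) = joinN (x :: zs) := by
  cases ys with
  | nil => cases zs with
    | nil => rfl
    | cons z zs => exact absurd (he.mp rfl) (by simp)
  | cons y ys' => cases zs with
    | nil => exact absurd (he.mpr rfl) (by simp)
    | cons z zs' => rw [joinN_cons_cons, joinN_cons_cons, h]

theorem joinN_append_congr (ws ys zs : List (List Char))
    (he : ys = [] ↔ zs = []) (h : joinN ys = joinN zs) :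
    joinN (ws ++ ys) = joinN (ws ++ zs) := by
  induction ws with
  | nil => simpa using h
  | cons w ws ih =>
      have he' : ws ++ ys = [] ↔ ws ++ zs = [] := by
        cases ws <;> simp [he]
      simpa using joinN_cons_congr w (ws ++ ys) (ws ++ zs) he' ih

theorem refA_ne_of_pend_ne (rest : List (List Char)) :
    ∀ pend : List (List Char), pend ≠ [] → refA rest pend ≠ [] := by
  induction rest with
  | nil => intro pend hp; cases pend with
    | nil => exact absurd rfl hp
    | cons a b => simp [refA]
  | cons l r ih =>
      intro pend hp
      cases pend with
      | nil => exact absurd rfl hp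
      | cons a b =>
          by_cases h : liLine l = true
          · simpa [refA, h] using ih (a :: b ++ [PySem.Chars.strip l]) (by simp)
          · simp [refA, h]

theorem refA_nil_eq_nil_iff (rest : List (List Char)) : refA rest [] = [] ↔ rest = [] := by
  cases rest with
  | nil => simp [refA]
  | cons l r => by_cases h : liLine l = true <;> simp [refA, h]

theorem buildB_eq_nil_iff (rest : List (List Char)) : buildB rest = [] ↔ rest = [] := by
  cases rest with
  | nil => simp [buildB]
  | cons l r => by_cases h : liLine l = true <;> simp [buildB, h]

theorem loopA_acc (lines : List (List Char)) (rest : List (List Char)) :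
    ∀ (i : Nat) (result cur : List (List Char)),
      loopA lines rest i result cur = result ++ loopA lines rest i [] cur := by
  induction rest with
  | nil =>
      intro i result cur
      by_cases h : cur.isEmpty = true <;> simp [loopA, h]
  | cons line r ih =>
      intro i result cur
      simp only [loopA, List.nil_append]
      split_ifs
      all_goals (conv_rhs => rw [ih])
      all_goals rw [ih]
      all_goals simp

theorem loopA_eq_refA (lines : List (List Char)) (rest : List (List Char)) :
    ∀ (i : Nat) (cur : List (List Char)),
      lines.drop i = rest →
      (cur.isEmpty = true → (i = 0 ∨ liLine (lines.getD (i - 1) []) = false)) →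
      loopA lines rest i [] cur = refA rest cur := by
  induction rest with
  | nil =>
      intro i cur _ _
      by_cases h : cur.isEmpty = true <;> simp [loopA, refA, h]
  | cons line r ih =>
      intro i cur hdrop hinv
      have hgetE : lines[i]? = some line := by
        have h1 : (List.drop i lines)[0]? = some line := by rw [hdrop]; rfl
        simpa using h1
      have hget : lines.getD i [] = line := by
        rw [List.getD_eq_getElem?_getD, hgetE]; rfl
      have hdrop' : List.drop (i + 1) lines = r := by
        have h1 : List.drop 1 (List.drop i lines) = r := by rw [hdrop]; rfl
        rwa [List.drop_drop] at h1
      by_cases h : liLine line = true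
      · by_cases hc : cur.isEmpty = true
        · have hcur : cur = [] := List.isEmpty_iff.mp hc
          have hcond : (cur.isEmpty && (i == 0 || !(liLine (lines.getD (i - 1) [])))) = true := by
            rcases hinv hc with h0 | hprev
            · simp only [hc, h0]; simp
            · simp only [hc, hprev]; simp
          simp only [loopA]
          rw [if_pos h, if_pos hcond, hcur]
          simp only [List.nil_append]
          rw [loopA_acc]
          rw [ih (i + 1) [PySem.Chars.strip line] hdrop'
                (by intro hemp; simp at hemp)]
          simp [refA, h]
        · have hce : cur.isEmpty = false := by simpa using hc
          simp only [loopA]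
          rw [if_pos h, if_neg (by simp [hce])]
          rw [ih (i + 1) (cur ++ [PySem.Chars.strip line]) hdrop'
                (by intro hemp; simp at hemp)]
          simp [refA, h, hce]
      · have hlf : liLine line = false := eq_false_of_ne_true h
        have hinv' : ([] : List (List Char)).isEmpty = true →
            (i + 1 = 0 ∨ liLine (lines.getD (i + 1 - 1) []) = false) := by
          intro _
          right
          rw [Nat.add_sub_cancel, hget, hlf]
        by_cases hc : cur.isEmpty = true
        · have hcur : cur = [] := List.isEmpty_iff.mp hc
          simp only [loopA]
          rw [if_neg h, if_pos hc, hcur]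
          simp only [List.nil_append]
          rw [loopA_acc]
          rw [ih (i + 1) [] hdrop' hinv']
          simp [refA, hlf]
        · have hce : cur.isEmpty = false := by simpa using hc
          simp only [loopA]
          rw [if_neg h, if_neg (by simp [hce])]
          rw [loopA_acc]
          rw [ih (i + 1) [] hdrop' hinv']
          simp [refA, hlf, hce]

theorem refA_join_eq (rest : List (List Char)) :
    ∀ pend : List (List Char), joinN (refA rest pend) = joinN (buildB' pend rest) := by
  induction rest with
  | nil =>
      intro pend
      by_cases hp : pend.isEmpty = true
      · simp [refA, buildB', hp, buildB]
      · have hpn : pend ≠ [] := by simpa [List.isEmpty_iff] using hp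
        simp only [refA, buildB', hp, Bool.false_eq_true, if_false]
        rw [show (joinN pend :: [['<','/','u','l','>']] : List (List Char))
              = joinN pend :: [['<','/','u','l','>']] from rfl]
        rw [joinN_collapse pend [['<','/','u','l','>']] hpn]
        simp [List.takeWhile, List.dropWhile, buildB]
  | cons l r ih =>
      intro pend
      by_cases h : liLine l = true
      · by_cases hp : pend.isEmpty = true
        · -- A starts a run; B emits the whole run of (l :: r)
          have hB : buildB' pend (l :: r)
              = ['<','u','l','>'] :: buildB' [PySem.Chars.strip l] r := by
            simp [buildB', hp, buildB, h]
          simp only [refA, h, hp, if_pos, hB]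
          refine joinN_cons_congr _ _ _ ?_ (ih [PySem.Chars.strip l])
          constructor
          · intro hh; exact absurd hh (refA_ne_of_pend_ne r _ (by simp))
          · intro hh
            exfalso
            have : buildB' [PySem.Chars.strip l] r ≠ [] := by
              simp [buildB']
            exact this hh
        · have hpn : pend ≠ [] := by simpa [List.isEmpty_iff] using hp
          have hB : buildB' pend (l :: r) = buildB' (pend ++ [PySem.Chars.strip l]) r := by
            simp [buildB', hp, h]
          simp only [refA, h, hp, Bool.false_eq_true, if_false, if_true, hB]
          exact ih (pend ++ [PySem.Chars.strip l])
      · by_cases hp : pend.isEmpty = true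
        · have hB : buildB' pend (l :: r) = l :: buildB' ([] : List (List Char)) r := by
            simp [buildB', hp, buildB, h]
          simp only [refA, h, hp, Bool.false_eq_true, if_false, if_true, hB]
          refine joinN_cons_congr _ _ _ ?_ (by simpa [buildB'] using ih ([] : List (List Char)))
          rw [refA_nil_eq_nil_iff]
          simp [buildB', buildB_eq_nil_iff]
        · have hpn : pend ≠ [] := by simpa [List.isEmpty_iff] using hp
          have hB : buildB' pend (l :: r)
              = pend ++ (['<','/','u','l','>'] :: l :: buildB r) := by
            simp [buildB', hp, h, buildB]
          simp only [refA, h, hp, Bool.false_eq_true, if_false, hB]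
          rw [show (joinN pend :: ['<','/','u','l','>'] :: l :: refA r [] : List (List Char))
                = joinN pend :: (['<','/','u','l','>'] :: l :: refA r []) from rfl]
          rw [joinN_collapse pend _ hpn]
          refine joinN_append_congr pend _ _ (by simp) ?_
          refine joinN_cons_congr _ _ _ (by simp) ?_
          refine joinN_cons_congr _ _ _ ?_ (by simpa [buildB'] using ih ([] : List (List Char)))
          rw [refA_nil_eq_nil_iff, buildB_eq_nil_iff]

-- ===== VERDICT (by name: the statement is the Claim_ definition above) =====
theorem group_li_tags_spec : Claim_equal_group_li_tags := by
  intro text _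
  unfold Spec_group_li_tags group_li_tags group_li_tags_alt
  simp only []
  have h1 := loopA_eq_refA (PySem.Chars.splitOn text.toList ['\n'])
    (PySem.Chars.splitOn text.toList ['\n']) 0 [] rfl (by intro _; left; rfl)
  rw [h1]
  have h2 := refA_join_eq (PySem.Chars.splitOn text.toList ['\n']) []
  rw [show buildB' [] (PySem.Chars.splitOn text.toList ['\n'])
        = buildB (PySem.Chars.splitOn text.toList ['\n']) by simp [buildB']] at h2
  rw [h2]
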